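-- pv_equiv track=rewrite | github.com/hsgodhia/agm_language_model | lm.py | conditional_count_bigrams
-- ===== SOURCE A (Python) =====
-- def conditional_count_bigrams(list_bgs):
--     cond_count_w2 = {}
--     for bg in list_bgs:
--         w1, w2 = bg
--         if w2 not in cond_count_w2:
--             cond_count_w2[w2] = {}
--         if w1 not in cond_count_w2[w2]:
--             cond_count_w2[w2][w1] = 0
--         cond_count_w2[w2][w1] += 1
--     return cond_count_w2
-- ===== SOURCE B (Python) =====
-- def conditional_count_bigrams(list_bgs):
--     # pass 1: flat count of whole bigrams, keyed by the (w1, w2) pair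
--     counts = {}
--     for bg in list_bgs:
--         key = tuple(bg)
--         counts[key] = counts.get(key, 0) + 1
--     # pass 2: pivot the flat counter into the nested dict keyed by w2
--     res = {}
--     for (w1, w2), n in counts.items():
--         res.setdefault(w2, {})[w1] = n
--     return res
-- ===== Notes on version B (the rewrite author's own statement) =====
-- stated objective: alternative
-- what changed: Replaces A's single pass that mutates a nested dict-of-dicts per bigram with two differently-shaped passes: first a flat one-pass counter keyed by the whole (w1, w2) pair, then a pivot pass over the counter's items that builds the nested result via setdefault.
import Mathlib
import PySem

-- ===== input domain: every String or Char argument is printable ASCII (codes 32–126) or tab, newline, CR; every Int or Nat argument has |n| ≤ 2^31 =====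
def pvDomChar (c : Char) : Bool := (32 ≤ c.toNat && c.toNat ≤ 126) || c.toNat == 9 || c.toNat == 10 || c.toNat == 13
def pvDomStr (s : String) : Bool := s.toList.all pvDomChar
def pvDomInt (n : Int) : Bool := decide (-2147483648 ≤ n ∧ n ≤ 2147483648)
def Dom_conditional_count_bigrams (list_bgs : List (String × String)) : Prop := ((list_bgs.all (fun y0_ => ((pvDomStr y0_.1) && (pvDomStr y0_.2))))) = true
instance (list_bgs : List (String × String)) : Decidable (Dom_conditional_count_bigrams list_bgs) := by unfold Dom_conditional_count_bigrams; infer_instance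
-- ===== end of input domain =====

-- B replaces A's single pass mutating a nested dict-of-dicts with two passes: a flat
-- counter of whole bigrams, then a pivot of the counter's items into the nested dict
-- (alternative decomposition, same cost).

-- ===== PORT A =====
-- one iteration of A's loop body (w1, w2 = bg; two membership guards; += 1)
def pvAStep (cond : PySem.Dict String (PySem.Dict String Int)) (bg : String × String) :
    PySem.Dict String (PySem.Dict String Int) :=
  let w1 := bg.1
  let w2 := bg.2
  let cond := if cond.contains w2 then cond else cond.insert w2 PySem.Dict.empty
  let inner := cond.getD w2 PySem.Dict.empty
  let inner := if inner.contains w1 then inner else inner.insert w1 0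
  cond.insert w2 (inner.insert w1 (inner.getD w1 0 + 1))

def conditional_count_bigrams (list_bgs : List (String × String)) :
    List (String × List (String × Int)) :=
  let cond_count_w2 := list_bgs.foldl pvAStep PySem.Dict.empty
  cond_count_w2.items.map (fun p => (p.1, p.2.items))

-- ===== PORT B =====
-- one iteration of B's pivot loop body: res.setdefault(w2, {})[w1] = n
def pvBStep (res : PySem.Dict String (PySem.Dict String Int))
    (p : (String × String) × Int) : PySem.Dict String (PySem.Dict String Int) :=
  let res := res.setdefault p.1.2 PySem.Dict.empty
  res.insert p.1.2 ((res.getD p.1.2 PySem.Dict.empty).insert p.1.1 p.2)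

def conditional_count_bigrams_alt (list_bgs : List (String × String)) :
    List (String × List (String × Int)) :=
  let counts : PySem.Dict (String × String) Int :=
    list_bgs.foldl (fun c bg => c.insert bg (c.getD bg 0 + 1)) PySem.Dict.empty
  let res := counts.items.foldl pvBStep PySem.Dict.empty
  res.items.map (fun p => (p.1, p.2.items))

-- ===== PRECONDITION & SPEC =====
def Spec_conditional_count_bigrams (list_bgs : List (String × String)) (out : List (String × List (String × Int))) : Prop := out = conditional_count_bigrams_alt list_bgs
instance (list_bgs : List (String × String)) (out : List (String × List (String × Int))) : Decidable (Spec_conditional_count_bigrams list_bgs out) := by unfold Spec_conditional_count_bigrams; infer_instance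

-- ===== CLAIM (what is proved, stated in full; the proofs are below) =====
def Claim_equal_conditional_count_bigrams : Prop := ∀ (list_bgs : List (String × String)), Dom_conditional_count_bigrams list_bgs → Spec_conditional_count_bigrams list_bgs (conditional_count_bigrams list_bgs)

-- ===== LEMMAS AND PROOFS =====

-- canonical description of the nested count dict built by both programs
def pvS2 (l : List (String × String)) : List String :=
  PySem.Set.ofList (l.map Prod.snd)

def pvS1 (l : List (String × String)) (w2 : String) : List String :=
  PySem.Set.ofList ((l.filter (fun p => p.2 == w2)).map Prod.fst)

def pvInner (l : List (String × String)) (w2 : String) : PySem.Dict String Int :=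
  PySem.Dict.mk ((pvS1 l w2).map (fun w1 => (w1, (l.count (w1, w2) : Int))))

def pvCanon (l : List (String × String)) : PySem.Dict String (PySem.Dict String Int) :=
  PySem.Dict.mk ((pvS2 l).map (fun w2 => (w2, pvInner l w2)))

-- canonical description of the pivot of a flat pair/count list
def pvCanonP (ps : List ((String × String) × Int)) :
    PySem.Dict String (PySem.Dict String Int) :=
  PySem.Dict.mk ((PySem.Set.ofList (ps.map (fun p => p.1.2))).map
    (fun w2 => (w2, PySem.Dict.mk ((ps.filter (fun p => p.1.2 == w2)).map
      (fun p => (p.1.1, p.2))))))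

theorem pv_mem_S1 (l : List (String × String)) (w1 w2 : String) :
    w1 ∈ pvS1 l w2 ↔ (w1, w2) ∈ l := by
  rw [pvS1, PySem.Set.mem_ofList]
  simp only [List.mem_map, List.mem_filter, beq_iff_eq]
  constructor
  · rintro ⟨p, ⟨hp, h2⟩, h1⟩
    have : p = (w1, w2) := by cases p; simp_all
    rwa [this] at hp
  · intro h; exact ⟨(w1, w2), ⟨h, rfl⟩, rfl⟩

theorem pv_mem_S2 (l : List (String × String)) (w2 : String) :
    w2 ∈ pvS2 l ↔ ∃ w1, (w1, w2) ∈ l := by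
  rw [pvS2, PySem.Set.mem_ofList]
  simp only [List.mem_map]
  constructor
  · rintro ⟨p, hp, h2⟩; exact ⟨p.1, by cases p; simp_all⟩
  · rintro ⟨w1, h⟩; exact ⟨(w1, w2), h, rfl⟩

theorem pv_count_append_ne (l : List (String × String)) (b : String × String)
    (u w : String) (h : (u, w) ≠ b) :
    (l ++ [b]).count (u, w) = l.count (u, w) := by
  rw [List.count_append]
  simp [Ne.symm h]

theorem pvInner_append_ne (l : List (String × String)) (b : String × String)
    (w : String) (hw : w ≠ b.2) : pvInner (l ++ [b]) w = pvInner l w := by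
  have hf : [b].filter (fun p => p.2 == w) = [] := by
    simp only [List.filter_cons, List.filter_nil, beq_iff_eq]
    rw [if_neg]; intro he; exact hw he.symm
  rw [pvInner, pvInner, pvS1, pvS1, List.filter_append, hf, List.append_nil]
  apply congrArg
  apply List.map_congr_left
  intro u _
  have : (u, w) ≠ b := fun he => hw (by rw [← he])
  rw [pv_count_append_ne l b u w this]

-- keys of the canonical dict
theorem pv_keys_canon (l : List (String × String)) : (pvCanon l).keys = pvS2 l := by
  rw [pvCanon, PySem.Dict.keys_mk, List.map_map]
  simp [Function.comp_def]

theorem pv_keys_inner (l : List (String × String)) (w2 : String) :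
    (pvInner l w2).keys = pvS1 l w2 := by
  rw [pvInner, PySem.Dict.keys_mk, List.map_map]
  simp [Function.comp_def]

theorem pv_nodup_keys_canon (l : List (String × String)) : (pvCanon l).keys.Nodup := by
  rw [pv_keys_canon]; exact PySem.Set.nodup_ofList _

theorem pv_contains_canon (l : List (String × String)) (w : String) :
    (pvCanon l).contains w = decide (w ∈ pvS2 l) := by
  rw [PySem.Dict.contains_eq_decide_mem_keys, pv_keys_canon]

theorem pv_getD_canon (l : List (String × String)) (w : String) (hw : w ∈ pvS2 l) :
    (pvCanon l).getD w PySem.Dict.empty = pvInner l w := by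
  apply PySem.Dict.getD_of_mem_items
  · rw [pvCanon]
    show _ ∈ (pvS2 l).map _
    exact List.mem_map_of_mem hw
  · exact pv_nodup_keys_canon l

theorem pv_contains_inner (l : List (String × String)) (w2 w1 : String) :
    (pvInner l w2).contains w1 = decide (w1 ∈ pvS1 l w2) := by
  rw [PySem.Dict.contains_eq_decide_mem_keys, pv_keys_inner]

theorem pv_getD_inner (l : List (String × String)) (w2 w1 : String) (hw : w1 ∈ pvS1 l w2) :
    (pvInner l w2).getD w1 0 = (l.count (w1, w2) : Int) := by
  apply PySem.Dict.getD_of_mem_items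
  · rw [pvInner]
    show _ ∈ (pvS1 l w2).map _
    exact List.mem_map_of_mem hw
  · rw [pv_keys_inner]; exact PySem.Set.nodup_ofList _

theorem pvS2_append (l : List (String × String)) (b : String × String) :
    pvS2 (l ++ [b]) = PySem.Set.add (pvS2 l) b.2 := by
  rw [pvS2, pvS2, List.map_append, List.map_cons, List.map_nil,
    PySem.Set.ofList_append_singleton]

theorem pvS1_append_self (l : List (String × String)) (w1 w2 : String) :
    pvS1 (l ++ [(w1, w2)]) w2 = PySem.Set.add (pvS1 l w2) w1 := by
  rw [pvS1, pvS1, List.filter_append]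
  simp only [List.filter_cons, List.filter_nil, beq_self_eq_true, if_true]
  rw [List.map_append, List.map_cons, List.map_nil, PySem.Set.ofList_append_singleton]

theorem pvInner_append_self (l : List (String × String)) (w1 w2 : String) :
    pvInner (l ++ [(w1, w2)]) w2
      = (pvInner l w2).insert w1 ((l.count (w1, w2) : Int) + 1) := by
  apply PySem.Dict.ext
  by_cases hw1 : w1 ∈ pvS1 l w2
  · rw [PySem.Dict.items_insert_of_contains _ _
      (by rw [pv_contains_inner]; exact decide_eq_true hw1)]
    show ((pvS1 (l ++ [(w1, w2)]) w2).map _) = _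
    rw [pvS1_append_self, PySem.Set.add_of_mem hw1]
    show _ = ((pvS1 l w2).map _).map _
    rw [List.map_map]
    apply List.map_congr_left
    intro u _
    by_cases hu : u = w1
    · subst hu
      simp only [Function.comp_apply, beq_self_eq_true, if_true]
      rw [List.count_append]
      simp
    · have hne : (u, w2) ≠ (w1, w2) := by simp [hu]
      simp only [Function.comp_apply, beq_iff_eq, if_neg hu]
      rw [pv_count_append_ne l _ u w2 hne]
  · rw [PySem.Dict.items_insert_of_not_contains _ _
      (by rw [pv_contains_inner]; exact decide_eq_false hw1)]
    show ((pvS1 (l ++ [(w1, w2)]) w2).map _) = (pvInner l w2).items ++ _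
    rw [pvS1_append_self, PySem.Set.add_of_not_mem hw1, List.map_append]
    congr 1
    · show _ = (pvS1 l w2).map _
      apply List.map_congr_left
      intro u hu
      have hune : u ≠ w1 := fun he => hw1 (he ▸ hu)
      have hne : (u, w2) ≠ (w1, w2) := by simp [hune]
      rw [pv_count_append_ne l _ u w2 hne]
    · have hc : l.count (w1, w2) = 0 :=
        List.count_eq_zero.mpr (fun hm => hw1 ((pv_mem_S1 l w1 w2).mpr hm))
      simp [List.count_append, hc]

theorem pv_filter_eq_nil (l : List (String × String)) (w2 : String) (hw2 : w2 ∉ pvS2 l) :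
    l.filter (fun p => p.2 == w2) = [] := by
  rw [List.filter_eq_nil_iff]
  intro p hp
  simp only [beq_iff_eq]
  intro he
  exact hw2 ((pv_mem_S2 l w2).mpr ⟨p.1, by cases p; simp_all⟩)

theorem pvAStep_canon (l : List (String × String)) (b : String × String) :
    pvAStep (pvCanon l) b = pvCanon (l ++ [b]) := by
  obtain ⟨w1, w2⟩ := b
  unfold pvAStep
  dsimp only
  by_cases hw2 : w2 ∈ pvS2 l
  · rw [pv_contains_canon, decide_eq_true hw2, if_pos rfl, pv_getD_canon l w2 hw2]
    apply PySem.Dict.ext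
    rw [PySem.Dict.items_insert_of_contains _ _
      (by rw [pv_contains_canon]; exact decide_eq_true hw2)]
    show ((pvS2 l).map _).map _ = ((pvS2 (l ++ [(w1, w2)])).map _)
    rw [pvS2_append, PySem.Set.add_of_mem hw2, List.map_map]
    apply List.map_congr_left
    intro w hwmem
    by_cases hw : w = w2
    · subst hw
      simp only [Function.comp_apply, beq_self_eq_true, if_true]
      rw [pvInner_append_self]
      by_cases hw1 : w1 ∈ pvS1 l w
      · rw [pv_contains_inner, decide_eq_true hw1, if_pos rfl, pv_getD_inner l w w1 hw1]
      · rw [pv_contains_inner, decide_eq_false hw1, if_neg (by simp),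
          PySem.Dict.getD_insert_self, PySem.Dict.insert_insert_self]
        have hc : l.count (w1, w) = 0 :=
          List.count_eq_zero.mpr (fun hm => hw1 ((pv_mem_S1 l w1 w).mpr hm))
        rw [hc]
        norm_num
    · simp only [Function.comp_apply, beq_iff_eq, if_neg hw]
      rw [pvInner_append_ne l _ w (by simpa using hw)]
  · rw [pv_contains_canon, decide_eq_false hw2, if_neg (by simp),
      PySem.Dict.getD_insert_self]
    rw [PySem.Dict.contains_empty, if_neg (by simp), PySem.Dict.getD_insert_self,
      PySem.Dict.insert_insert_self, PySem.Dict.insert_insert_self]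
    apply PySem.Dict.ext
    rw [PySem.Dict.items_insert_of_not_contains _ _
      (by rw [pv_contains_canon]; exact decide_eq_false hw2)]
    show (pvCanon l).items ++ _ = ((pvS2 (l ++ [(w1, w2)])).map _)
    rw [pvS2_append, PySem.Set.add_of_not_mem hw2, List.map_append]
    congr 1
    · show (pvS2 l).map _ = (pvS2 l).map _
      apply List.map_congr_left
      intro w hwmem
      have hw : w ≠ w2 := fun he => hw2 (he ▸ hwmem)
      rw [pvInner_append_ne l _ w (by simpa using hw)]
    · show _ = [(w2, pvInner (l ++ [(w1, w2)]) w2)]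
      have h1 : pvS1 (l ++ [(w1, w2)]) w2 = [w1] := by
        rw [pvS1, List.filter_append, pv_filter_eq_nil l w2 hw2]
        simp
        rfl
      have hc : l.count (w1, w2) = 0 := by
        rw [List.count_eq_zero]
        intro hm
        exact hw2 ((pv_mem_S2 l w2).mpr ⟨w1, hm⟩)
      rw [pvInner, h1]
      simp only [List.map_cons, List.map_nil, List.count_append, hc]
      norm_num
      rfl

def pvT2 (ps : List ((String × String) × Int)) : List String :=
  PySem.Set.ofList (ps.map (fun p => p.1.2))

def pvInnerP (ps : List ((String × String) × Int)) (w2 : String) : PySem.Dict String Int :=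
  PySem.Dict.mk ((ps.filter (fun p => p.1.2 == w2)).map (fun p => (p.1.1, p.2)))

theorem pvCanonP_eq (ps : List ((String × String) × Int)) :
    pvCanonP ps = PySem.Dict.mk ((pvT2 ps).map (fun w2 => (w2, pvInnerP ps w2))) := rfl

theorem pv_keys_canonP (ps : List ((String × String) × Int)) :
    (pvCanonP ps).keys = pvT2 ps := by
  rw [pvCanonP_eq, PySem.Dict.keys_mk, List.map_map]
  simp [Function.comp_def]

theorem pv_contains_canonP (ps : List ((String × String) × Int)) (w : String) :
    (pvCanonP ps).contains w = decide (w ∈ pvT2 ps) := by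
  rw [PySem.Dict.contains_eq_decide_mem_keys, pv_keys_canonP]

theorem pv_getD_canonP (ps : List ((String × String) × Int)) (w : String) (hw : w ∈ pvT2 ps) :
    (pvCanonP ps).getD w PySem.Dict.empty = pvInnerP ps w := by
  apply PySem.Dict.getD_of_mem_items
  · rw [pvCanonP_eq]
    show _ ∈ (pvT2 ps).map _
    exact List.mem_map_of_mem hw
  · rw [pv_keys_canonP]; exact PySem.Set.nodup_ofList _

theorem pvT2_append (ps : List ((String × String) × Int)) (q : (String × String) × Int) :
    pvT2 (ps ++ [q]) = PySem.Set.add (pvT2 ps) q.1.2 := by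
  rw [pvT2, pvT2, List.map_append, List.map_cons, List.map_nil,
    PySem.Set.ofList_append_singleton]

theorem pvInnerP_append_ne (ps : List ((String × String) × Int))
    (q : (String × String) × Int) (w : String) (hw : w ≠ q.1.2) :
    pvInnerP (ps ++ [q]) w = pvInnerP ps w := by
  rw [pvInnerP, pvInnerP, List.filter_append]
  have hf : [q].filter (fun p => p.1.2 == w) = [] := by
    simp only [List.filter_cons, List.filter_nil, beq_iff_eq]
    rw [if_neg]; intro he; exact hw he.symm
  rw [hf, List.append_nil]

theorem pvInnerP_append_self (ps : List ((String × String) × Int))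
    (q : (String × String) × Int) :
    pvInnerP (ps ++ [q]) q.1.2
      = PySem.Dict.mk ((ps.filter (fun p => p.1.2 == q.1.2)).map (fun p => (p.1.1, p.2))
          ++ [(q.1.1, q.2)]) := by
  rw [pvInnerP, List.filter_append]
  simp

theorem pvBStep_canon (ps : List ((String × String) × Int)) (q : (String × String) × Int)
    (h : q.1 ∉ ps.map Prod.fst) :
    pvBStep (pvCanonP ps) q = pvCanonP (ps ++ [q]) := by
  have hw1 : (pvInnerP ps q.1.2).contains q.1.1 = false := by
    rw [PySem.Dict.contains_eq_decide_mem_keys, decide_eq_false]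
    rw [pvInnerP, PySem.Dict.keys_mk, List.map_map]
    intro hm
    obtain ⟨p, hp, hpe⟩ := List.mem_map.mp hm
    have hp2 : p.1.2 = q.1.2 := by simpa using (List.mem_filter.mp hp).2
    have hp1 : p.1.1 = q.1.1 := hpe
    have : p.1 = q.1 := Prod.ext hp1 hp2
    exact h (this ▸ List.mem_map_of_mem (List.mem_filter.mp hp).1)
  unfold pvBStep
  dsimp only
  rw [pvCanonP_eq (ps ++ [q])]
  by_cases hw2 : q.1.2 ∈ pvT2 ps
  · rw [PySem.Dict.setdefault_of_contains _ _
      (by rw [pv_contains_canonP]; exact decide_eq_true hw2),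
      pv_getD_canonP ps _ hw2]
    apply PySem.Dict.ext
    rw [PySem.Dict.items_insert_of_contains _ _
      (by rw [pv_contains_canonP]; exact decide_eq_true hw2)]
    show ((pvT2 ps).map _).map _ = ((pvT2 (ps ++ [q])).map _)
    rw [pvT2_append, PySem.Set.add_of_mem hw2, List.map_map]
    apply List.map_congr_left
    intro w hwmem
    by_cases hw : w = q.1.2
    · subst hw
      simp only [Function.comp_apply, beq_self_eq_true, if_true]
      rw [pvInnerP_append_self]
      refine congrArg (fun d => (q.1.2, d)) ?_
      apply PySem.Dict.ext
      rw [PySem.Dict.items_insert_of_not_contains _ _ hw1]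
      rfl
    · simp only [Function.comp_apply, beq_iff_eq, if_neg hw]
      rw [pvInnerP_append_ne ps q w hw]
      rfl
  · rw [PySem.Dict.setdefault_of_not_contains _ _
      (by rw [pv_contains_canonP]; exact decide_eq_false hw2),
      PySem.Dict.getD_insert_self, PySem.Dict.insert_insert_self]
    apply PySem.Dict.ext
    rw [PySem.Dict.items_insert_of_not_contains _ _
      (by rw [pv_contains_canonP]; exact decide_eq_false hw2)]
    show (pvCanonP ps).items ++ _ = ((pvT2 (ps ++ [q])).map _)
    rw [pvT2_append, PySem.Set.add_of_not_mem hw2, List.map_append]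
    congr 1
    · show (pvT2 ps).map _ = (pvT2 ps).map _
      apply List.map_congr_left
      intro w hwmem
      have hw : w ≠ q.1.2 := fun he => hw2 (he ▸ hwmem)
      rw [pvInnerP_append_ne ps q w hw]
      rfl
    · show _ = [(q.1.2, pvInnerP (ps ++ [q]) q.1.2)]
      have hf : ps.filter (fun p => p.1.2 == q.1.2) = [] := by
        rw [List.filter_eq_nil_iff]
        intro p hp
        simp only [beq_iff_eq]
        intro he
        exact hw2 ((PySem.Set.mem_ofList _ _).mpr (by
          exact List.mem_map.mpr ⟨p, hp, he⟩))
      rw [pvInnerP_append_self, hf]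
      rfl

theorem pv_ofList_map_ofList {α β : Type} [BEq α] [LawfulBEq α] [BEq β] [LawfulBEq β]
    (f : α → β) (l : List α) :
    PySem.Set.ofList ((PySem.Set.ofList l).map f) = PySem.Set.ofList (l.map f) := by
  induction l using List.reverseRecOn with
  | nil => rfl
  | append_singleton l x ih =>
    rw [PySem.Set.ofList_append_singleton, List.map_append, List.map_cons, List.map_nil,
      PySem.Set.ofList_append_singleton, ← ih]
    by_cases hx : x ∈ PySem.Set.ofList l
    · rw [PySem.Set.add_of_mem hx, PySem.Set.add_of_mem]
      simp only [PySem.Set.mem_ofList, List.mem_map]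
      exact ⟨x, (PySem.Set.mem_ofList _ _).mp hx, rfl⟩
    · rw [PySem.Set.add_of_not_mem hx, List.map_append, List.map_cons, List.map_nil,
        PySem.Set.ofList_append_singleton]

theorem pv_ofList_filter {α : Type} [BEq α] [LawfulBEq α] (q : α → Bool) (l : List α) :
    PySem.Set.ofList (l.filter q) = (PySem.Set.ofList l).filter q := by
  induction l using List.reverseRecOn with
  | nil => rfl
  | append_singleton l x ih =>
    rw [List.filter_append, PySem.Set.ofList_append_singleton]
    by_cases hx : x ∈ PySem.Set.ofList l
    · rw [PySem.Set.add_of_mem hx]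
      by_cases hq : q x
      · simp only [List.filter_cons, hq, List.filter_nil, if_true]
        rw [PySem.Set.ofList_append_singleton, PySem.Set.add_of_mem, ih]
        rw [PySem.Set.mem_ofList, List.mem_filter]
        exact ⟨(PySem.Set.mem_ofList _ _).mp hx, hq⟩
      · simp only [List.filter_cons, hq, List.filter_nil, if_false, List.append_nil, ih,
          Bool.false_eq_true]
    · rw [PySem.Set.add_of_not_mem hx, List.filter_append]
      by_cases hq : q x
      · simp only [List.filter_cons, hq, List.filter_nil, if_true]
        rw [PySem.Set.ofList_append_singleton, PySem.Set.add_of_not_mem, ih]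
        rw [PySem.Set.mem_ofList, List.mem_filter]
        intro h; exact hx ((PySem.Set.mem_ofList _ _).mpr h.1)
      · simp only [List.filter_cons, hq, List.filter_nil, if_false, List.append_nil, ih,
          Bool.false_eq_true]

theorem pv_ofList_const_snd (w2 : String) (m : List (String × String))
    (h : ∀ p ∈ m, p.2 = w2) :
    PySem.Set.ofList m = (PySem.Set.ofList (m.map Prod.fst)).map (fun u => (u, w2)) := by
  induction m using List.reverseRecOn with
  | nil => rfl
  | append_singleton m p ih =>
    have hp : p.2 = w2 := h p (by simp)
    have hmem : p ∈ m ↔ p.1 ∈ m.map Prod.fst := by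
      constructor
      · intro hm; exact List.mem_map_of_mem hm
      · intro hm
        obtain ⟨r, hr, hre⟩ := List.mem_map.mp hm
        have : r = p := by
          have := h r (by simp [hr])
          cases r; cases p; simp_all
        rwa [← this]
    have ih' := ih (fun q hq => h q (by simp [hq]))
    rw [List.map_append, List.map_cons, List.map_nil,
      PySem.Set.ofList_append_singleton, PySem.Set.ofList_append_singleton]
    by_cases hx : p ∈ PySem.Set.ofList m
    · rw [PySem.Set.add_of_mem hx, PySem.Set.add_of_mem, ih']
      rw [PySem.Set.mem_ofList] at hx ⊢
      exact hmem.mp hx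
    · rw [PySem.Set.add_of_not_mem hx, PySem.Set.add_of_not_mem, ih', List.map_append]
      · simp [← hp]
      · rw [PySem.Set.mem_ofList] at hx ⊢
        exact fun hc => hx (hmem.mpr hc)

theorem pvCanonP_counter (l : List (String × String)) :
    pvCanonP ((PySem.Dict.counter l).items) = pvCanon l := by
  rw [pvCanonP_eq, pvCanon, PySem.Dict.items_counter]
  have hT2 : pvT2 ((PySem.Set.ofList l).map (fun k => (k, (l.count k : Int)))) = pvS2 l := by
    rw [pvT2, List.map_map, pvS2]
    have : ((fun (p : (String × String) × Int) => p.1.2) ∘ (fun k => (k, (l.count k : Int))))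
        = Prod.snd := by funext k; rfl
    rw [this, pv_ofList_map_ofList]
  rw [hT2]
  apply congrArg
  apply List.map_congr_left
  intro w2 hw2
  refine congrArg (fun d => (w2, d)) ?_
  rw [pvInnerP, List.filter_map, List.map_map]
  have hfil : (PySem.Set.ofList l).filter
      ((fun (p : (String × String) × Int) => p.1.2 == w2) ∘ (fun k => (k, (l.count k : Int))))
      = (pvS1 l w2).map (fun u => (u, w2)) := by
    have : ((fun (p : (String × String) × Int) => p.1.2 == w2) ∘ (fun k => (k, (l.count k : Int))))
        = (fun (k : String × String) => k.2 == w2) := by funext k; rfl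
    rw [this, ← pv_ofList_filter]
    rw [pv_ofList_const_snd w2 _ (fun p hp => by simpa using (List.mem_filter.mp hp).2)]
    rfl
  rw [hfil, List.map_map, pvInner]
  apply PySem.Dict.ext
  show List.map _ (pvS1 l w2) = List.map _ (pvS1 l w2)
  apply List.map_congr_left
  intro u _
  rfl


theorem pvA_fold_eq (l : List (String × String)) :
    l.foldl pvAStep PySem.Dict.empty = pvCanon l := by
  induction l using List.reverseRecOn with
  | nil => rfl
  | append_singleton l b ih =>
    rw [List.foldl_append, List.foldl_cons, List.foldl_nil, ih, pvAStep_canon]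

theorem pvB_fold_eq (ps : List ((String × String) × Int)) (h : (ps.map Prod.fst).Nodup) :
    ps.foldl pvBStep PySem.Dict.empty = pvCanonP ps := by
  induction ps using List.reverseRecOn with
  | nil => rfl
  | append_singleton ps q ih =>
    rw [List.foldl_append, List.foldl_cons, List.foldl_nil]
    rw [List.map_append] at h
    have h1 := h.of_append_left
    have h2 : q.1 ∉ ps.map Prod.fst := by
      intro hm
      exact (List.disjoint_of_nodup_append h) hm (by simp)
    rw [ih h1, pvBStep_canon ps q h2]

-- ===== VERDICT (by name: the statement is the Claim_ definition above) =====
theorem conditional_count_bigrams_spec : Claim_equal_conditional_count_bigrams := by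
  intro l _
  unfold Spec_conditional_count_bigrams conditional_count_bigrams conditional_count_bigrams_alt
  dsimp only
  rw [PySem.Dict.foldl_insert_getD_add_one_eq_counter]
  rw [pvA_fold_eq, pvB_fold_eq _ (by
    have := PySem.Dict.nodup_keys_counter (κ := String × String) l
    simpa [PySem.Dict.keys] using this), pvCanonP_counter]
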